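-- pv_equiv track=rewrite | github.com/rubelw/OSSS | src/OSSS/ai/agents/query_data/handlers/gl_account_balances_handler.py | _select_gl_account_balances_fields
-- ===== SOURCE A (Python) =====
-- from typing import Any, Dict, List, Sequence
--
-- def _select_gl_account_balances_fields(
--     rows: Sequence[Dict[str, Any]],
-- ) -> List[str]:
--     """
--     Choose a stable, user-friendly column ordering, but gracefully
--     include any extra keys that the API returns.
--     """
--     if not rows:
--         return []
--
--     # Adjust this preferred order to match your actual gl_account_balances schema.
--     preferred_order = [
--         "id",
--         "gl_account_id",
--         "account_number",
--         "account_name",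
--         "fiscal_year_id",
--         "fiscal_year_code",
--         "fiscal_period_id",
--         "fiscal_period_code",
--         "as_of_date",
--         "beginning_balance",
--         "debits",
--         "credits",
--         "net_activity",
--         "ending_balance",
--         "fund",
--         "function",
--         "program",
--         "project",
--         "location",
--         "is_closed",
--         "is_active",
--         "created_at",
--         "updated_at",
--     ]
--
--     all_keys: List[str] = []
--     for r in rows:
--         for k in r.keys():
--             if k not in all_keys:
--                 all_keys.append(k)
--
--     ordered = [k for k in preferred_order if k in all_keys]
--     ordered.extend(k for k in all_keys if k not in ordered)
--     return ordered
-- ===== SOURCE B (Python) =====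
-- from typing import Any, Dict, List, Sequence
--
-- _PREFERRED_ORDER = [
--     "id",
--     "gl_account_id",
--     "account_number",
--     "account_name",
--     "fiscal_year_id",
--     "fiscal_year_code",
--     "fiscal_period_id",
--     "fiscal_period_code",
--     "as_of_date",
--     "beginning_balance",
--     "debits",
--     "credits",
--     "net_activity",
--     "ending_balance",
--     "fund",
--     "function",
--     "program",
--     "project",
--     "location",
--     "is_closed",
--     "is_active",
--     "created_at",
--     "updated_at",
-- ]
--
--
-- def _select_gl_account_balances_fields(
--     rows: Sequence[Dict[str, Any]],
-- ) -> List[str]: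
--     """Rank-and-sort: give every key a numeric rank (its preferred index, or
--     len(preferred) + first-seen position for extras) and sort the distinct
--     keys by that rank.  Correct because ranks are distinct and the target
--     order -- preferred keys by preferred index, then extras by first
--     appearance -- is exactly ascending rank."""
--     n = len(_PREFERRED_ORDER)
--     rank = {k: i for i, k in enumerate(_PREFERRED_ORDER)}
--     first_seen: Dict[str, int] = {}
--     for r in rows:
--         for k in r.keys():
--             if k not in first_seen:
--                 first_seen[k] = len(first_seen)
--     return sorted(first_seen, key=lambda k: rank.get(k, n + first_seen[k]))
-- ===== Notes on version B (the rewrite author's own statement) =====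
-- stated objective: faster
-- what changed: Replaces A's dedup-list with two membership-rescanning filter passes by a rank-and-sort scheme: one dict pass records each key's first-seen position, then the distinct keys are sorted by a numeric rank (preferred index, or len(preferred)+first-seen position for extras).
import Mathlib
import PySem

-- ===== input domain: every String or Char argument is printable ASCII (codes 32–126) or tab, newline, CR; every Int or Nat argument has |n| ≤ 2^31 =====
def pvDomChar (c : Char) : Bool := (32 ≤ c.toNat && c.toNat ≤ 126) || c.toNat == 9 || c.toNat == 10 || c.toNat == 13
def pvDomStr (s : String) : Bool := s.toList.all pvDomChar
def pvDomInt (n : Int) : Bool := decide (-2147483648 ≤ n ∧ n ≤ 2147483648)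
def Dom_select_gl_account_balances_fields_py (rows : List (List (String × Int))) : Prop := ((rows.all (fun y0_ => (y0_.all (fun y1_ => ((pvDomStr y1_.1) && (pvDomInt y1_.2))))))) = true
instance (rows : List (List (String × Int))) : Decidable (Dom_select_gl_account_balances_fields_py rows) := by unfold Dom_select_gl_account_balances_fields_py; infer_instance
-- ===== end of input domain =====

-- B replaces A's dedup-list plus two membership-rescanning filter passes by a
-- rank-and-sort scheme: record each key's first-seen position in a dict, then
-- sort the distinct keys by a numeric rank (objective: faster).

-- the module's preferred column order (shared constant)
def pvPreferredOrder : List String :=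
  ["id", "gl_account_id", "account_number", "account_name", "fiscal_year_id",
   "fiscal_year_code", "fiscal_period_id", "fiscal_period_code", "as_of_date",
   "beginning_balance", "debits", "credits", "net_activity", "ending_balance",
   "fund", "function", "program", "project", "location", "is_closed",
   "is_active", "created_at", "updated_at"]

-- ===== PORT A =====
-- 'if k not in <growing list>: <growing list>.append(k)' — used for A's all_keys loop
-- and for A's ordered.extend(...) generator (which tests against the mutating 'ordered')
def pvAddKey (ak : List String) (k : String) : List String :=
  if k ∈ ak then ak else ak ++ [k]

def select_gl_account_balances_fields_py (rows : List (List (String × Int))) : List String :=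
  if rows = [] then []
  else
    let all_keys := rows.foldl (fun ak r => (r.map Prod.fst).foldl pvAddKey ak) []
    let ordered := pvPreferredOrder.filter (fun k => decide (k ∈ all_keys))
    all_keys.foldl pvAddKey ordered

-- ===== PORT B =====
-- rank = {k: i for i, k in enumerate(_PREFERRED_ORDER)}
def pvRank : PySem.Dict String Int :=
  (pvPreferredOrder.zipIdx).foldl (fun d p => d.insert p.1 (p.2 : Int)) PySem.Dict.empty

-- 'if k not in first_seen: first_seen[k] = len(first_seen)'
def pvFirstSeen (rows : List (List (String × Int))) : PySem.Dict String Int :=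
  rows.foldl (fun d r => (r.map Prod.fst).foldl
    (fun d k => if d.contains k then d else d.insert k (d.size : Int)) d) PySem.Dict.empty

-- sorted(first_seen, key=lambda k: rank.get(k, n + first_seen[k]))
def select_gl_account_balances_fields_py_alt (rows : List (List (String × Int))) : List String :=
  let n : Int := (pvPreferredOrder.length : Int)
  let fs := pvFirstSeen rows
  PySem.List.sorted fs.keys (fun k => pvRank.getD k (n + fs.getD k 0)) false

-- ===== PRECONDITION & SPEC =====
def Spec_select_gl_account_balances_fields_py (rows : List (List (String × Int))) (out : List String) : Prop := out = select_gl_account_balances_fields_py_alt rows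
instance (rows : List (List (String × Int))) (out : List String) : Decidable (Spec_select_gl_account_balances_fields_py rows out) := by unfold Spec_select_gl_account_balances_fields_py; infer_instance

-- ===== CLAIM (what is proved, stated in full; the proofs are below) =====
def Claim_equal_select_gl_account_balances_fields_py : Prop := ∀ (rows : List (List (String × Int))), Dom_select_gl_account_balances_fields_py rows → Spec_select_gl_account_balances_fields_py rows (select_gl_account_balances_fields_py rows)

-- ===== LEMMAS AND PROOFS =====

-- the items list first_seen reaches after seeing exactly the distinct keys s, in order
def pvPairs (s : List String) : List (String × Int) :=
  s.zipIdx.map (fun p => (p.1, (p.2 : Int)))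

lemma pvPairs_fst (s : List String) : (pvPairs s).map Prod.fst = s := by
  simp [pvPairs, Function.comp_def]

lemma pvPairs_append (s : List String) (k : String) :
    pvPairs (s ++ [k]) = pvPairs s ++ [(k, (s.length : Int))] := by
  simp [pvPairs, List.zipIdx_append]

-- one step of B's first_seen loop tracks one step of A's all_keys dedup
lemma pv_fs_step (s : List String) (k : String) :
    (if (PySem.Dict.mk (pvPairs s)).contains k then PySem.Dict.mk (pvPairs s)
     else (PySem.Dict.mk (pvPairs s)).insert k ((PySem.Dict.mk (pvPairs s)).size : Int))
      = PySem.Dict.mk (pvPairs (pvAddKey s k)) := by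
  have hkeys : (PySem.Dict.mk (pvPairs s)).keys = s := by
    simp [PySem.Dict.keys, pvPairs_fst]
  have hc : (PySem.Dict.mk (pvPairs s)).contains k = decide (k ∈ s) := by
    rw [PySem.Dict.contains_eq_decide_mem_keys, hkeys]
  by_cases hk : k ∈ s
  · simp [hc, hk, pvAddKey]
  · have hins := PySem.Dict.items_insert_of_not_contains (PySem.Dict.mk (pvPairs s))
      ((PySem.Dict.mk (pvPairs s)).size : Int) (by rw [hc]; simp [hk])
    have hsz : (PySem.Dict.mk (pvPairs s)).size = s.length := by
      simp [PySem.Dict.size, pvPairs]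
    apply PySem.Dict.ext
    rw [hsz] at hins
    simp only [hc, hk, decide_false, Bool.false_eq_true, if_false]
    rw [hsz, hins]
    simp [pvAddKey, hk, pvPairs_append]

lemma pv_fs_inner (ks : List String) (s : List String) :
    ks.foldl (fun d k => if d.contains k then d else d.insert k (d.size : Int))
        (PySem.Dict.mk (pvPairs s))
      = PySem.Dict.mk (pvPairs (ks.foldl pvAddKey s)) := by
  induction ks generalizing s with
  | nil => rfl
  | cons k ks ih => simp only [List.foldl_cons, pv_fs_step]; exact ih _

lemma pv_fs_rows (rows : List (List (String × Int))) :
    pvFirstSeen rows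
      = PySem.Dict.mk (pvPairs (rows.foldl (fun ak r => (r.map Prod.fst).foldl pvAddKey ak) [])) := by
  show rows.foldl _ (PySem.Dict.mk (pvPairs [])) = _
  induction rows with
  | nil => rfl
  | cons r rows ih =>
    simp only [List.foldl_cons, pv_fs_inner] at *
    -- reduce both folds to the same shape
    have : ∀ (l : List (List (String × Int))) (s : List String),
        l.foldl (fun d r => (r.map Prod.fst).foldl
            (fun d k => if d.contains k then d else d.insert k (d.size : Int)) d)
          (PySem.Dict.mk (pvPairs s))
        = PySem.Dict.mk (pvPairs (l.foldl (fun ak r => (r.map Prod.fst).foldl pvAddKey ak) s)) := by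
      intro l
      induction l with
      | nil => intro s; rfl
      | cons r' l' ih' => intro s; simp only [List.foldl_cons, pv_fs_inner]; exact ih' _
    exact this _ _

-- the dedup loop keeps the accumulator duplicate-free
lemma pv_nodup_addKey (ks : List String) (s : List String) (h : s.Nodup) :
    (ks.foldl pvAddKey s).Nodup := by
  induction ks generalizing s with
  | nil => exact h
  | cons k ks ih =>
    simp only [List.foldl_cons]
    by_cases hk : k ∈ s
    · rw [show pvAddKey s k = s from by simp [pvAddKey, hk]]; exact ih s h
    · rw [show pvAddKey s k = s ++ [k] from by simp [pvAddKey, hk]]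
      exact ih _ (by simp [List.nodup_append, h]; exact fun a ha he => hk (he ▸ ha))

lemma pv_nodup_allKeys (rows : List (List (String × Int))) (s : List String) (h : s.Nodup) :
    (rows.foldl (fun ak r => (r.map Prod.fst).foldl pvAddKey ak) s).Nodup := by
  induction rows generalizing s with
  | nil => exact h
  | cons r rows ih => exact ih _ (pv_nodup_addKey _ _ h)

-- A's extend loop over a duplicate-free list whose base holds exactly its preferred keys
-- appends exactly the non-preferred keys, in order
lemma pv_extend_fold (l : List String) (base : List String) (hnd : l.Nodup)
    (h : ∀ k ∈ l, (k ∈ base ↔ k ∈ pvPreferredOrder)) :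
    l.foldl pvAddKey base = base ++ l.filter (fun k => decide (k ∉ pvPreferredOrder)) := by
  induction l generalizing base with
  | nil => simp
  | cons k l ih =>
    obtain ⟨hkl, hnd'⟩ := List.nodup_cons.mp hnd
    simp only [List.foldl_cons]
    by_cases hp : k ∈ pvPreferredOrder
    · have hkb : k ∈ base := (h k (.head _)).mpr hp
      rw [show pvAddKey base k = base from by simp [pvAddKey, hkb]]
      rw [ih base hnd' (fun k' hk' => h k' (.tail _ hk'))]
      simp [hp]
    · have hkb : k ∉ base := fun hc => hp ((h k (.head _)).mp hc)
      rw [show pvAddKey base k = base ++ [k] from by simp [pvAddKey, hkb]]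
      rw [ih (base ++ [k]) hnd' ?_]
      · simp [hp]
      · intro k' hk'
        have hne : k' ≠ k := fun he => hkl (he ▸ hk')
        simp [List.mem_append, hne, h k' (.tail _ hk')]

-- the rank dict is the literal 23-entry dict; facts about it are decidable
lemma pvRank_keys : pvRank.keys = pvPreferredOrder := by decide
lemma pvRank_get?_of_mem : ∀ k ∈ pvPreferredOrder,
    pvRank.get? k = some ((pvPreferredOrder.idxOf k : Nat) : Int) := by decide

lemma pvRank_getD_of_mem (k : String) (hk : k ∈ pvPreferredOrder) (d : Int) :
    pvRank.getD k d = ((pvPreferredOrder.idxOf k : Nat) : Int) :=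
  PySem.Dict.getD_of_get?_eq_some _ d (pvRank_get?_of_mem k hk)

lemma pvRank_getD_of_not_mem (k : String) (hk : k ∉ pvPreferredOrder) (d : Int) :
    pvRank.getD k d = d := by
  apply PySem.Dict.getD_of_not_contains
  rw [PySem.Dict.contains_eq_decide_mem_keys, pvRank_keys]
  simpa using hk

-- lookup in first_seen at position i of the deduped key list gives i
lemma pv_fs_getD_at (ak : List String) (hnd : ak.Nodup) (i : Nat) (hi : i < ak.length) :
    (PySem.Dict.mk (pvPairs ak)).getD ak[i] 0 = (i : Int) := by
  have hkeys : (PySem.Dict.mk (pvPairs ak)).keys = ak := by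
    simp [PySem.Dict.keys, pvPairs_fst]
  have hmem : (ak[i], (i : Int)) ∈ (PySem.Dict.mk (pvPairs ak)).items := by
    show _ ∈ pvPairs ak
    have : (ak[i], i) ∈ ak.zipIdx := by
      have := List.getElem_zipIdx (l := ak) (j := 0) (i := i) (by simpa using hi)
      simp only [Nat.zero_add] at this
      rw [← this]; exact List.getElem_mem _
    exact List.mem_map.mpr ⟨(ak[i], i), this, rfl⟩
  exact PySem.Dict.getD_of_mem_items _ hmem (by rw [hkeys]; exact hnd) 0

-- ===== VERDICT (by name: the statement is the Claim_ definition above) =====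
theorem select_gl_account_balances_fields_py_spec : Claim_equal_select_gl_account_balances_fields_py := by
  intro rows _
  show _ = _
  unfold select_gl_account_balances_fields_py select_gl_account_balances_fields_py_alt
  rw [pv_fs_rows]
  set ak := rows.foldl (fun ak r => (r.map Prod.fst).foldl pvAddKey ak) [] with hakdef
  have hnd : ak.Nodup := pv_nodup_allKeys rows [] List.nodup_nil
  have hkeys : (PySem.Dict.mk (pvPairs ak)).keys = ak := by
    simp [PySem.Dict.keys, pvPairs_fst]
  set K : String → Int :=
    fun k => pvRank.getD k ((pvPreferredOrder.length : Int) + (PySem.Dict.mk (pvPairs ak)).getD k 0)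
    with hKdef
  set T : List String := pvPreferredOrder.filter (fun k => decide (k ∈ ak))
      ++ ak.filter (fun k => decide (k ∉ pvPreferredOrder)) with hTdef
  -- A's value is T
  have hA : (if rows = [] then []
      else
        let all_keys := rows.foldl (fun ak r => (r.map Prod.fst).foldl pvAddKey ak) []
        let ordered := pvPreferredOrder.filter (fun k => decide (k ∈ all_keys))
        all_keys.foldl pvAddKey ordered) = T := by
    by_cases hrows : rows = []
    · subst hrows; rw [if_pos rfl, hTdef]
      have : ak = [] := rfl
      rw [this]; rfl
    · simp only [if_neg hrows, ← hakdef]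
      rw [pv_extend_fold ak (pvPreferredOrder.filter (fun k => decide (k ∈ ak))) hnd ?_, hTdef]
      intro k hk
      simp [List.mem_filter, hk]
  -- B's value is also T: T is a strictly-K-increasing permutation of ak
  have hperm : T.Perm ak := by
    have h1 : (pvPreferredOrder.filter (fun k => decide (k ∈ ak))).Perm
        (ak.filter (fun k => decide (k ∈ pvPreferredOrder))) := by
      rw [List.perm_ext_iff_of_nodup (List.Nodup.filter _ (by decide)) (List.Nodup.filter _ hnd)]
      intro a; simp [List.mem_filter, and_comm]
    have h2 : (ak.filter (fun k => decide (k ∈ pvPreferredOrder))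
        ++ ak.filter (fun k => decide (k ∉ pvPreferredOrder))).Perm ak := by
      have := List.filter_append_perm (fun k => decide (k ∈ pvPreferredOrder)) ak
      refine List.Perm.trans ?_ this
      apply List.Perm.append_left
      apply List.Perm.of_eq
      apply List.filter_congr
      intro x _; simp
    exact (h1.append_right _).trans h2
  -- K is strictly increasing along T
  have hKpref : ∀ k ∈ pvPreferredOrder, K k = ((pvPreferredOrder.idxOf k : Nat) : Int) := by
    intro k hk; rw [hKdef]; exact pvRank_getD_of_mem k hk _
  have hKextra : ∀ i : Nat, ∀ hi : i < ak.length, ak[i] ∉ pvPreferredOrder →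
      K ak[i] = (pvPreferredOrder.length : Int) + (i : Int) := by
    intro i hi hnp
    rw [hKdef]
    simp only
    rw [pvRank_getD_of_not_mem _ hnp, pv_fs_getD_at ak hnd i hi]
  have hpw : T.Pairwise (fun a b => K a < K b) := by
    rw [hTdef, List.pairwise_append]
    refine ⟨?_, ?_, ?_⟩
    · -- within preferred part: idxOf strictly increases along pvPreferredOrder
      have hbase : pvPreferredOrder.Pairwise
          (fun a b => ((pvPreferredOrder.idxOf a : Nat) : Int) < ((pvPreferredOrder.idxOf b : Nat) : Int)) := by
        decide
      have := hbase.filter (fun k => decide (k ∈ ak))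
      refine this.imp_of_mem ?_
      intro a b ha hb hlt
      have ha' := (List.mem_filter.mp ha).1
      have hb' := (List.mem_filter.mp hb).1
      rw [hKpref a ha', hKpref b hb']; exact hlt
    · -- within extras: first-seen positions strictly increase
      have hpos : ak.Pairwise (fun a b =>
          (PySem.Dict.mk (pvPairs ak)).getD a 0 < (PySem.Dict.mk (pvPairs ak)).getD b 0) := by
        rw [List.pairwise_iff_getElem]
        intro i j hi hj hij
        rw [pv_fs_getD_at ak hnd i hi, pv_fs_getD_at ak hnd j hj]
        exact_mod_cast hij
      have hflt := hpos.filter (fun k => decide (k ∉ pvPreferredOrder))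
      refine hflt.imp_of_mem ?_
      intro a b ha hb hlt
      have hanp : a ∉ pvPreferredOrder := by simpa using (List.mem_filter.mp ha).2
      have hbnp : b ∉ pvPreferredOrder := by simpa using (List.mem_filter.mp hb).2
      rw [hKdef]
      simp only
      rw [pvRank_getD_of_not_mem _ hanp, pvRank_getD_of_not_mem _ hbnp]
      omega
    · -- cross: preferred rank < length ≤ length + position
      intro a ha b hb
      have ha' := (List.mem_filter.mp ha).1
      have hb1 := List.mem_filter.mp hb
      have hbak : b ∈ ak := hb1.1
      have hbnp : b ∉ pvPreferredOrder := by simpa using hb1.2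
      obtain ⟨i, hi, hbi⟩ := List.getElem_of_mem hbak
      rw [hKpref a ha', ← hbi, hKextra i hi (hbi ▸ hbnp)]
      have : pvPreferredOrder.idxOf a < pvPreferredOrder.length := List.idxOf_lt_length_of_mem ha'
      omega
  rw [hA]
  show T = PySem.List.sorted (PySem.Dict.mk (pvPairs ak)).keys
      (fun k => pvRank.getD k ((pvPreferredOrder.length : Int)
        + (PySem.Dict.mk (pvPairs ak)).getD k 0)) false
  rw [hkeys]
  exact (PySem.List.sorted_eq_of_perm_of_pairwise_lt ak T K hperm hpw).symm
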